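-- pv_equiv track=rewrite | github.com/jloutey-hash/geovac | debug/kcc_unified_heatkernel.py | euler_maclaurin_upper_boundary
-- ===== SOURCE A (Python) =====
-- def euler_maclaurin_upper_boundary(N):
--     """Phase 4H finding F2: Δ⁻¹ = 40 is the Euler-Maclaurin upper boundary term
--     of the Dirac mode-count sum at n = N = 3.
--
--     The simplest reading: the EM formula for Σ_{n=0}^N f(n) has a boundary term
--     f(N)/2. For f(n) = g_n^Dirac = 2(n+1)(n+2), f(N)/2 = (N+1)(N+2). Some readings
--     use f(N), or the cumulative sum value at upper cutoff.
--     """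
--     f_at_N = 2 * (N + 1) * (N + 2)  # = g_N^Dirac
--     half_f_at_N = (N + 1) * (N + 2)
--     cumsum = sum(2 * (k + 1) * (k + 2) for k in range(N + 1))  # Σ_{k=0}^N g_k
--     return {
--         "g_N": f_at_N,
--         "f(N)/2": half_f_at_N,
--         "cumulative_sum": cumsum,
--     }
-- ===== SOURCE B (Python) =====
-- def euler_maclaurin_upper_boundary(N):
--     # Closed form: sum_{k=0}^{N} 2(k+1)(k+2) = 2(N+1)(N+2)(N+3)/3 for N >= 0, else 0.
--     g_N = 2 * (N + 1) * (N + 2)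
--     cumsum = 2 * (N + 1) * (N + 2) * (N + 3) // 3 if N >= 0 else 0
--     return {
--         "g_N": g_N,
--         "f(N)/2": (N + 1) * (N + 2),
--         "cumulative_sum": cumsum,
--     }
-- ===== Notes on version B (the rewrite author's own statement) =====
-- stated objective: faster
-- what changed: Replaced the O(N) generator sum over range(N+1) by the closed-form polynomial 2(N+1)(N+2)(N+3)//3 (0 for N<0).
import Mathlib
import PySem

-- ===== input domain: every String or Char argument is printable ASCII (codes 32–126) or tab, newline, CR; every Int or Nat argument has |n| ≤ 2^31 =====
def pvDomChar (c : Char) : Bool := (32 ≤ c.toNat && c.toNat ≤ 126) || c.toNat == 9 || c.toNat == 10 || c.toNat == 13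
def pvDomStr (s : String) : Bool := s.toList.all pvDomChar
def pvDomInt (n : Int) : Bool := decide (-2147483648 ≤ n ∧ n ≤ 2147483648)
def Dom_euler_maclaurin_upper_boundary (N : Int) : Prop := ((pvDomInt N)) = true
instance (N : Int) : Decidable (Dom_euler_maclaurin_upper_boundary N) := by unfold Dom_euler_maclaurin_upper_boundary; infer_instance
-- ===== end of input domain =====

-- B replaces A's O(N) loop computing the cumulative sum by the closed-form polynomial 2(N+1)(N+2)(N+3)//3 (0 for N < 0): objective faster.


-- ===== PORT A =====
def euler_maclaurin_upper_boundary (N : Int) : List (String × Int) :=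
  let f_at_N := 2 * (N + 1) * (N + 2)
  let half_f_at_N := (N + 1) * (N + 2)
  let cumsum := (PySem.List.pyRange 0 (N + 1) 1).foldl (fun acc k => acc + 2 * (k + 1) * (k + 2)) 0
  [("g_N", f_at_N), ("f(N)/2", half_f_at_N), ("cumulative_sum", cumsum)]

-- ===== PORT B =====
def euler_maclaurin_upper_boundary_alt (N : Int) : List (String × Int) :=
  let g_N := 2 * (N + 1) * (N + 2)
  let cumsum := if N ≥ 0 then PySem.Int.floordiv (2 * (N + 1) * (N + 2) * (N + 3)) 3 else 0
  [("g_N", g_N), ("f(N)/2", (N + 1) * (N + 2)), ("cumulative_sum", cumsum)]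

-- ===== PRECONDITION & SPEC =====
def Spec_euler_maclaurin_upper_boundary (N : Int) (out : List (String × Int)) : Prop := out = euler_maclaurin_upper_boundary_alt N
instance (N : Int) (out : List (String × Int)) : Decidable (Spec_euler_maclaurin_upper_boundary N out) := by unfold Spec_euler_maclaurin_upper_boundary; infer_instance

-- ===== CLAIM (what is proved, stated in full; the proofs are below) =====
def Claim_equal_euler_maclaurin_upper_boundary : Prop := ∀ (N : Int), Dom_euler_maclaurin_upper_boundary N → Spec_euler_maclaurin_upper_boundary N (euler_maclaurin_upper_boundary N)

-- ===== LEMMAS AND PROOFS =====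

-- 3 × (A's running sum over range(0, n)) has the closed polynomial form.
lemma sum3 (n : Nat) (acc : Int) :
    3 * ((PySem.List.pyRange 0 (n : Int) 1).foldl (fun acc k => acc + 2 * (k + 1) * (k + 2)) acc)
      = 3 * acc + 2 * (n : Int) * ((n : Int) + 1) * ((n : Int) + 2) := by
  induction n generalizing acc with
  | zero => simp
  | succ m ih =>
      have h : PySem.List.pyRange 0 ((m : Int) + 1) 1
          = PySem.List.pyRange 0 (m : Int) 1 ++ [(m : Int)] :=
        PySem.List.pyRange_one_succ_right (by omega)
      push_cast
      rw [h, List.foldl_append, List.foldl_cons, List.foldl_nil]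
      linear_combination ih acc

lemma cumsum_closed (N : Int) (hN : 0 ≤ N) :
    (PySem.List.pyRange 0 (N + 1) 1).foldl (fun acc k => acc + 2 * (k + 1) * (k + 2)) 0
      = PySem.Int.floordiv (2 * (N + 1) * (N + 2) * (N + 3)) 3 := by
  obtain ⟨n, rfl⟩ := Int.eq_ofNat_of_zero_le hN
  have h := sum3 (n + 1) 0
  push_cast at h
  rw [PySem.Int.floordiv_eq_ediv_of_pos (by norm_num)]
  have h2 : 2 * ((n : Int) + 1) * ((n : Int) + 2) * ((n : Int) + 3)
      = 3 * ((PySem.List.pyRange 0 ((n : Int) + 1) 1).foldl (fun acc k => acc + 2 * (k + 1) * (k + 2)) 0) := by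
    rw [h]; ring
  rw [h2, Int.mul_ediv_cancel_left _ (by norm_num)]

-- ===== VERDICT (by name: the statement is the Claim_ definition above) =====
theorem euler_maclaurin_upper_boundary_spec : Claim_equal_euler_maclaurin_upper_boundary := by
  intro N _
  unfold Spec_euler_maclaurin_upper_boundary euler_maclaurin_upper_boundary euler_maclaurin_upper_boundary_alt
  by_cases hN : 0 ≤ N
  · simp only [ge_iff_le, hN, if_pos, cumsum_closed N hN]
  · have h : PySem.List.pyRange 0 (N + 1) 1 = [] :=
      PySem.List.pyRange_one_eq_nil (by omega)
    simp [h, hN]
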